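-- pv_equiv track=rewrite | github.com/thrilok1989/nifty | Merged error cleaned .py | group_by_continuity
-- ===== SOURCE A (Python) =====
-- def group_by_continuity(strike_list):
--     strike_list.sort()
--     zones = []
--     if not strike_list:
--         return zones
--     current = [strike_list[0]]
--     for i in range(1, len(strike_list)):
--         if strike_list[i] - strike_list[i - 1] <= 50:
--             current.append(strike_list[i])
--         else:
--             if len(current) >= 2:
--                 zones.append((min(current), max(current)))
--             current = [strike_list[i]]
--     if len(current) >= 2:
--         zones.append((min(current), max(current)))
--     return zones
-- ===== SOURCE B (Python) =====
-- def group_by_continuity(strike_list):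
--     strike_list.sort()
--     n = len(strike_list)
--     breaks = [i for i in range(1, n) if strike_list[i] - strike_list[i - 1] > 50]
--     if n == 0:
--         return []
--     bounds = [0] + breaks + [n]
--     return [(strike_list[a], strike_list[b - 1])
--             for a, b in zip(bounds, bounds[1:]) if b - a >= 2]
-- ===== Notes on version B (the rewrite author's own statement) =====
-- stated objective: alternative
-- what changed: Replaced the single accumulator pass that grows a 'current' run list and takes min/max of it by a two-phase decomposition: first compute the break indices (gaps > 50) over the sorted list, then emit zones by zipping consecutive segment boundaries and indexing the segment endpoints directly.
import Mathlib
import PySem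

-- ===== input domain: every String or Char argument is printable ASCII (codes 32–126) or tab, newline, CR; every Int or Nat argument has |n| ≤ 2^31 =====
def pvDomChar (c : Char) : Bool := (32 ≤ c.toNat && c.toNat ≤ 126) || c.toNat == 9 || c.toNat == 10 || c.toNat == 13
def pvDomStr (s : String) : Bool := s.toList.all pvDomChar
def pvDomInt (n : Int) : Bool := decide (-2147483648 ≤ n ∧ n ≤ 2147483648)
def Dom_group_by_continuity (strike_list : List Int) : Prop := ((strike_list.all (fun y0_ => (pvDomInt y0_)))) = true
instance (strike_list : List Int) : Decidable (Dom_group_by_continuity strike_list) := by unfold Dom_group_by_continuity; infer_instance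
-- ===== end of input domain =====

-- B replaces A's single accumulator pass (grow a `current` run, emit (min, max) of it) by a
-- two-phase decomposition: compute the break indices of the sorted list, then emit zones from
-- zipped segment boundaries.  Both Pythons sort the argument in place; the equivalence proved
-- here is about the return value (the in-place sort side effect is identical in A and B).

-- ===== PORT A =====
-- helper: the trailing 'if len(current) >= 2: zones.append((min(current), max(current)))'
def gbcFinish (zones : List (Int × Int)) (cur : List Int) : List (Int × Int) :=
  if 2 ≤ cur.length then
    zones ++ [((PySem.List.min? cur (fun x => x)).getD 0, (PySem.List.max? cur (fun x => x)).getD 0)]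
  else zones

-- helper: one iteration of A's for-loop body; x = strike_list[i], p = strike_list[i-1]
def gbcStep (acc : List (Int × Int) × List Int) (x p : Int) : List (Int × Int) × List Int :=
  if x - p ≤ 50 then (acc.1, acc.2 ++ [x])
  else (gbcFinish acc.1 acc.2, [x])

def group_by_continuity (strike_list : List Int) : List (Int × Int) :=
  let s := PySem.List.sorted strike_list (fun x => x) false
  if s = [] then []
  else
    let r := (PySem.List.pyRange 1 (s.length : Int) 1).foldl
      (fun acc i => gbcStep acc (PySem.List.pyGetD s i 0) (PySem.List.pyGetD s (i - 1) 0))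
      ([], [PySem.List.pyGetD s 0 0])
    gbcFinish r.1 r.2

-- ===== PORT B =====
def group_by_continuity_alt (strike_list : List Int) : List (Int × Int) :=
  let s := PySem.List.sorted strike_list (fun x => x) false
  let n : Int := s.length
  let breaks := (PySem.List.pyRange 1 n 1).filter
      (fun i => decide (50 < PySem.List.pyGetD s i 0 - PySem.List.pyGetD s (i - 1) 0))
  if n = 0 then []
  else
    let bounds := 0 :: (breaks ++ [n])
    ((bounds.zip bounds.tail).filter (fun p => decide (2 ≤ p.2 - p.1))).map
      (fun p => (PySem.List.pyGetD s p.1 0, PySem.List.pyGetD s (p.2 - 1) 0))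

-- ===== PRECONDITION & SPEC =====
def Spec_group_by_continuity (strike_list : List Int) (out : List (Int × Int)) : Prop := out = group_by_continuity_alt strike_list
instance (strike_list : List Int) (out : List (Int × Int)) : Decidable (Spec_group_by_continuity strike_list out) := by unfold Spec_group_by_continuity; infer_instance

-- ===== CLAIM (what is proved, stated in full; the proofs are below) =====
def Claim_equal_group_by_continuity : Prop := ∀ (strike_list : List Int), Dom_group_by_continuity strike_list → Spec_group_by_continuity strike_list (group_by_continuity strike_list)

-- ===== LEMMAS AND PROOFS =====

-- split a list into the leading ≤50-gap run (relative to a previous value) and the remainder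
def runSplit (p : Int) : List Int → List Int × List Int
  | [] => ([], [])
  | x :: r => if x - p ≤ 50 then (x :: (runSplit x r).1, (runSplit x r).2) else ([], x :: r)

lemma runSplit_snd_length (p : Int) (l : List Int) : (runSplit p l).2.length ≤ l.length := by
  induction l generalizing p with
  | nil => simp [runSplit]
  | cons x r ih =>
    simp only [runSplit]
    split
    · exact le_trans (ih x) (by simp)
    · simp

lemma runSplit_append (p : Int) (l : List Int) : (runSplit p l).1 ++ (runSplit p l).2 = l := by
  induction l generalizing p with
  | nil => simp [runSplit]
  | cons x r ih =>
    simp only [runSplit]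
    split
    · simpa using ih x
    · simp

-- reference chunk-wise description shared by the A-side and B-side proofs
def emitChunk (c : List Int) : List (Int × Int) :=
  if 2 ≤ c.length then [(c.getD 0 0, c.getD (c.length - 1) 0)] else []

def ref : List Int → List (Int × Int)
  | [] => []
  | h :: t => emitChunk (h :: (runSplit h t).1) ++ ref (runSplit h t).2
termination_by l => l.length
decreasing_by
  have := runSplit_snd_length h t
  simp; omega

-- ── A side ──

-- structural form of A's fold over (value, previous-value) pairs
def aRun (zones : List (Int × Int)) (cur : List Int) (prev : Int) : List Int → List (Int × Int)
  | [] => gbcFinish zones cur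
  | x :: r => if x - prev ≤ 50 then aRun zones (cur ++ [x]) x r
              else aRun (gbcFinish zones cur) [x] x r

lemma foldl_range_getD {α β : Type} (l : List α) (d : α) (g : β → α → β) (init : β) :
    (List.range l.length).foldl (fun a k => g a (l.getD k d)) init = l.foldl g init := by
  induction l generalizing init with
  | nil => simp
  | cons x r ih =>
    simp [List.range_succ_eq_map, List.foldl_map]
    exact ih (g init x)

lemma zip_fold_eq_aRun (rest : List Int) :
    ∀ (prev : Int) (zones : List (Int × Int)) (cur : List Int),
      (let q := (rest.zip (prev :: rest)).foldl (fun a q => gbcStep a q.1 q.2) (zones, cur);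
        gbcFinish q.1 q.2) = aRun zones cur prev rest := by
  induction rest with
  | nil => intro prev zones cur; simp [aRun]
  | cons x r ih =>
    intro prev zones cur
    simp only [List.zip_cons_cons, List.foldl_cons, aRun, gbcStep]
    split
    · exact ih x zones (cur ++ [x])
    · exact ih x (gbcFinish zones cur) [x]

lemma foldl_min_sorted (t : List Int) : ∀ (x : Int), (∀ y ∈ t, x ≤ y) → t.foldl min x = x := by
  induction t with
  | nil => simp
  | cons y r ih =>
    intro x hx
    simp only [List.foldl_cons]
    rw [min_eq_left (hx y (by simp))]
    exact ih x (fun z hz => hx z (by simp [hz]))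

lemma foldl_max_sorted (t : List Int) : ∀ (x : Int), (x :: t).Pairwise (· ≤ ·) →
    t.foldl max x = (x :: t).getD t.length 0 := by
  induction t with
  | nil => simp
  | cons y r ih =>
    intro x hx
    simp only [List.foldl_cons]
    rw [max_eq_right ((List.pairwise_cons.mp hx).1 y (by simp))]
    simpa using ih y (List.pairwise_cons.mp hx).2

lemma gbcFinish_eq_emitChunk (zones : List (Int × Int)) (cur : List Int)
    (h : cur.Pairwise (· ≤ ·)) : gbcFinish zones cur = zones ++ emitChunk cur := by
  cases cur with
  | nil => simp [gbcFinish, emitChunk]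
  | cons c0 ct =>
    simp only [gbcFinish, emitChunk]
    split
    · have hmin : (PySem.List.min? (c0 :: ct) (fun x => x)).getD 0 = c0 := by
        rw [PySem.List.min?_id_cons]
        simp [foldl_min_sorted ct c0 (fun y hy => (List.pairwise_cons.mp h).1 y hy)]
      have hmax : (PySem.List.max? (c0 :: ct) (fun x => x)).getD 0 = (c0 :: ct).getD ct.length 0 := by
        rw [PySem.List.max?_id_cons]
        simp [foldl_max_sorted ct c0 h]
      simp [hmin, hmax]
    · simp

lemma aRun_eq (rest : List Int) :
    ∀ (cur : List Int) (prev : Int) (zones : List (Int × Int)),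
      cur ≠ [] → cur.getLast? = some prev → (cur ++ rest).Pairwise (· ≤ ·) →
      aRun zones cur prev rest
        = zones ++ emitChunk (cur ++ (runSplit prev rest).1) ++ ref (runSplit prev rest).2 := by
  induction rest with
  | nil =>
    intro cur prev zones hne _ hp
    simp only [aRun, runSplit, ref]
    rw [gbcFinish_eq_emitChunk zones cur (by simpa using hp)]
    simp
  | cons x r ih =>
    intro cur prev zones hne hlast hp
    simp only [aRun, runSplit]
    by_cases hle : x - prev ≤ 50
    · rw [if_pos hle, if_pos hle]
      have h3 : ((cur ++ [x]) ++ r).Pairwise (· ≤ ·) := by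
        simpa [List.append_assoc] using hp
      rw [ih (cur ++ [x]) x zones (by simp) (by simp) h3]
      simp [List.append_assoc]
    · rw [if_neg hle, if_neg hle]
      have h3 : ([x] ++ r).Pairwise (· ≤ ·) := by
        have : (x :: r).Sublist (cur ++ x :: r) := List.sublist_append_right _ _
        simpa using hp.sublist this
      rw [ih [x] x (gbcFinish zones cur) (by simp) (by simp) h3]
      rw [gbcFinish_eq_emitChunk zones cur (hp.sublist (List.sublist_append_left _ _))]
      simp only [ref]
      simp [List.append_assoc]

-- A's port computes ref of the sorted list
lemma A_eq_ref (l : List Int) :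
    group_by_continuity l = ref (PySem.List.sorted l (fun x => x) false) := by
  unfold group_by_continuity
  cases hs : PySem.List.sorted l (fun x => x) false with
  | nil => simp [ref]
  | cons h t =>
    have hp : (h :: t).Pairwise (· ≤ ·) := by
      have := PySem.List.sorted_pairwise (xs := l) (key := fun x => x)
      rw [hs] at this
      exact this
    simp only [List.cons_ne_nil, ite_false]
    rw [PySem.List.pyRange_one]
    have hlen : (((h :: t).length : Int) - 1).toNat = t.length := by simp
    rw [hlen, List.foldl_map]
    have hbody : (fun (acc : List (Int × Int) × List Int) (k : Nat) =>
          gbcStep acc (PySem.List.pyGetD (h :: t) (1 + (k : Int)) 0)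
            (PySem.List.pyGetD (h :: t) (1 + (k : Int) - 1) 0))
        = (fun acc k => gbcStep acc (t.getD k 0) ((h :: t).getD k 0)) := by
      funext acc k
      have e1 : (1 + (k : Int)) = ((k + 1 : Nat) : Int) := by push_cast; ring
      have e2 : (((k + 1 : Nat) : Int) - 1) = ((k : Nat) : Int) := by push_cast; ring
      rw [e1, e2, PySem.List.pyGetD_natCast, PySem.List.pyGetD_natCast]
      simp
    rw [hbody]
    have hzipfold : (List.range t.length).foldl
          (fun acc k => gbcStep acc (t.getD k 0) ((h :: t).getD k 0))
          ([], [PySem.List.pyGetD (h :: t) 0 0])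
        = (t.zip (h :: t)).foldl (fun a q => gbcStep a q.1 q.2)
            ([], [PySem.List.pyGetD (h :: t) 0 0]) := by
      have hzl : (t.zip (h :: t)).length = t.length := by simp
      rw [← foldl_range_getD (t.zip (h :: t)) (0, 0) (fun a q => gbcStep a q.1 q.2), hzl]
      apply PySem.List.foldl_congr_mem
      intro acc k hk
      have hk' : k < t.length := List.mem_range.mp hk
      have : (t.zip (h :: t)).getD k (0, 0) = (t.getD k 0, (h :: t).getD k 0) := by
        rw [List.getD_eq_getElem _ _ (by simpa using hk'), List.getD_eq_getElem _ _ (by omega),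
          List.getD_eq_getElem _ _ (by simp; omega)]
        simp [List.getElem_zip]
      rw [this]
    rw [hzipfold]
    have hzr := zip_fold_eq_aRun t h [] [PySem.List.pyGetD (h :: t) 0 0]
    simp only at hzr
    rw [hzr, PySem.List.pyGetD_zero_cons]
    rw [aRun_eq t [h] h [] (by simp) (by simp) (by simpa using hp)]
    simp only [List.nil_append, List.singleton_append]
    rw [ref]

-- ── B side ──

def natBreaks (s : List Int) : List Nat :=
  (List.range (s.length - 1)).filter (fun k => decide (50 < s.getD (k+1) 0 - s.getD k 0))

def natBounds (s : List Int) : List Nat :=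
  if s.length = 0 then [] else 0 :: ((natBreaks s).map (· + 1) ++ [s.length])

def zonesN (s : List Int) : List (Int × Int) :=
  (((natBounds s).zip (natBounds s).tail).filter (fun p => decide (p.1 + 2 ≤ p.2))).map
    (fun p => (s.getD p.1 0, s.getD (p.2 - 1) 0))

-- B's port computes zonesN of the sorted list
lemma B_eq_zonesN (l : List Int) :
    group_by_continuity_alt l = zonesN (PySem.List.sorted l (fun x => x) false) := by
  unfold group_by_continuity_alt
  cases hs : PySem.List.sorted l (fun x => x) false with
  | nil => simp [zonesN, natBounds]
  | cons h t =>
    simp only [show ¬ (((h :: t).length : Int) = 0) from by simp; omega, ite_false]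
    have hbr : (PySem.List.pyRange 1 ((h :: t).length : Int) 1).filter
          (fun i => decide (50 < PySem.List.pyGetD (h :: t) i 0 - PySem.List.pyGetD (h :: t) (i - 1) 0))
        = (natBreaks (h :: t)).map (fun k => ((k + 1 : Nat) : Int)) := by
      rw [PySem.List.pyRange_one]
      have hlen : (((h :: t).length : Int) - 1).toNat = t.length := by simp
      rw [hlen, List.filter_map]
      have hfun : (fun k : Nat => 1 + (k : Int)) = (fun k : Nat => ((k + 1 : Nat) : Int)) := by
        funext k; push_cast; ring
      rw [hfun]
      have hpred : List.filter
            ((fun i => decide (50 < PySem.List.pyGetD (h :: t) i 0 - PySem.List.pyGetD (h :: t) (i - 1) 0))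
              ∘ (fun k : Nat => ((k + 1 : Nat) : Int))) (List.range t.length)
          = List.filter (fun k => decide (50 < (h :: t).getD (k + 1) 0 - (h :: t).getD k 0))
              (List.range t.length) := by
        apply List.filter_congr
        intro k _
        have e2 : (((k + 1 : Nat) : Int) - 1) = ((k : Nat) : Int) := by push_cast; ring
        simp only [Function.comp, e2, PySem.List.pyGetD_natCast]
      rw [hpred]
      rw [show natBreaks (h :: t)
            = List.filter (fun k => decide (50 < (h :: t).getD (k + 1) 0 - (h :: t).getD k 0))
                (List.range t.length) from by simp [natBreaks]]
    rw [hbr]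
    have hbounds : (0 :: ((natBreaks (h :: t)).map (fun k => ((k + 1 : Nat) : Int)) ++ [((h :: t).length : Int)]))
        = (natBounds (h :: t)).map (fun m : Nat => (m : Int)) := by
      rw [natBounds, if_neg (by simp)]
      simp [List.map_map, Function.comp]
    rw [hbounds]
    have htail : ((natBounds (h :: t)).map (fun m : Nat => (m : Int))).tail
        = ((natBounds (h :: t)).tail).map (fun m : Nat => (m : Int)) := by
      cases natBounds (h :: t) <;> simp
    rw [htail, List.zip_map, List.filter_map]
    have hpred2 : List.filter
          ((fun p : Int × Int => decide (2 ≤ p.2 - p.1))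
            ∘ (Prod.map (fun m : Nat => (m : Int)) (fun m : Nat => (m : Int))))
          ((natBounds (h :: t)).zip (natBounds (h :: t)).tail)
        = List.filter (fun p => decide (p.1 + 2 ≤ p.2))
            ((natBounds (h :: t)).zip (natBounds (h :: t)).tail) := by
      apply List.filter_congr
      intro p _
      rcases p with ⟨a, b⟩
      simp only [Function.comp, Prod.map, decide_eq_decide]
      omega
    rw [hpred2, List.map_map, zonesN]
    apply List.map_congr_left
    intro p hp
    have hpge : p.1 + 2 ≤ p.2 := by
      have := (List.mem_filter.mp hp).2
      simpa using this
    rcases p with ⟨a, b⟩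
    simp only [Function.comp, Prod.map]
    have e3 : ((b : Int) - 1) = ((b - 1 : Nat) : Int) := by omega
    rw [e3, PySem.List.pyGetD_natCast, PySem.List.pyGetD_natCast]

lemma natBreaks_cons (h x : Int) (r : List Int) :
    natBreaks (h :: x :: r)
      = (if 50 < x - h then [0] else []) ++ (natBreaks (x :: r)).map (· + 1) := by
  simp only [natBreaks, List.length_cons]
  have e1 : (r.length + 1 + 1 - 1) = r.length + 1 := by omega
  have e2 : (r.length + 1 - 1) = r.length := by omega
  rw [e1, e2, List.range_succ_eq_map, List.filter_cons, List.filter_map]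
  have hshift : (List.filter ((fun k => decide (50 < (h :: x :: r).getD (k+1) 0 - (h :: x :: r).getD k 0)) ∘ Nat.succ) (List.range r.length))
       = List.filter (fun k => decide (50 < (x :: r).getD (k+1) 0 - (x :: r).getD k 0)) (List.range r.length) := by
    apply List.filter_congr
    intro k _
    simp [Nat.succ_eq_add_one, List.getD]
  rw [hshift]
  by_cases hb : 50 < x - h
  · simp [hb]
  · simp [hb]

lemma natBreaks_chunk (h : Int) (t : List Int) :
    natBreaks (h :: t)
      = (if (runSplit h t).2 = [] then [] else [(runSplit h t).1.length])
        ++ (natBreaks (runSplit h t).2).map (· + ((runSplit h t).1.length + 1)) := by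
  induction t generalizing h with
  | nil => simp [natBreaks, runSplit]
  | cons x r ih =>
    rw [natBreaks_cons]
    by_cases hle : x - h ≤ 50
    · rw [if_neg (by omega : ¬ 50 < x - h), ih x]
      simp only [runSplit, if_pos hle]
      by_cases h2 : (runSplit x r).2 = []
      · simp [h2]
      · simp only [List.map_append, List.map_map]
        simp [h2]
    · rw [if_pos (by omega : 50 < x - h)]
      simp only [runSplit, if_neg hle]
      simp

lemma zonesN_eq_ref : ∀ (n : Nat) (s : List Int), s.length ≤ n → zonesN s = ref s := by
  intro n
  induction n with
  | zero =>
    intro s hs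
    have : s = [] := by cases s <;> simp_all
    subst this
    simp [zonesN, natBounds, ref]
  | succ n ih =>
    intro s hs
    cases s with
    | nil => simp [zonesN, natBounds, ref]
    | cons h t =>
      set c : List Int := h :: (runSplit h t).1 with hc
      set rest : List Int := (runSplit h t).2 with hrest
      have hsplit : h :: t = c ++ rest := by
        rw [hc, hrest]; simpa using (runSplit_append h t).symm
      have hk : c.length = (runSplit h t).1.length + 1 := by simp [hc]
      have hrle : rest.length ≤ t.length := runSplit_snd_length h t
      have hlen : (h :: t).length = c.length + rest.length := by
        rw [hsplit]; simp
      by_cases h2 : rest = []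
      · -- single chunk
        have hbr : natBreaks (h :: t) = [] := by
          rw [natBreaks_chunk]; simp [← hrest, h2, natBreaks]
        have hb : natBounds (h :: t) = [0, (h :: t).length] := by
          simp [natBounds, hbr]
        rw [zonesN, hb]
        have hcel : h :: t = c := by rw [hsplit, h2]; simp
        rw [ref, ← hrest, h2, ref, ← hc, ← hcel]
        by_cases hL : 1 ≤ t.length
        · simp only [emitChunk, List.zip_cons_cons, List.tail_cons, List.zip_nil_right,
            List.length_cons]
          simp [show 0 + 2 ≤ t.length + 1 by omega]
        · simp only [emitChunk, List.zip_cons_cons, List.tail_cons, List.zip_nil_right,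
            List.length_cons]
          simp [show ¬ (0 + 2 ≤ t.length + 1) by omega]
      · -- multi-chunk case
        have hrl0 : rest.length ≠ 0 := by
          intro hh; exact h2 (List.eq_nil_of_length_eq_zero hh)
        have hnbr : natBounds rest = 0 :: ((natBreaks rest).map (· + 1) ++ [rest.length]) := by
          rw [natBounds, if_neg hrl0]
        have hbounds : natBounds (h :: t) = 0 :: (natBounds rest).map (· + c.length) := by
          rw [natBounds, if_neg (by simp)]
          rw [natBreaks_chunk, if_neg (hrest ▸ h2), hnbr]
          simp only [List.map_cons, List.map_append, List.map_map, List.map_cons, List.map_nil]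
          have hfun : ∀ j ∈ natBreaks rest,
              ((fun x => x + 1) ∘ fun x => x + ((runSplit h t).1.length + 1)) j
                = ((fun x => x + c.length) ∘ fun x => x + 1) j := by
            intro j _; simp [hk]; omega
          rw [List.map_congr_left hfun]
          simp [show (runSplit h t).1.length + 1 = 0 + c.length from by simp [hk],
                show (h :: t).length = rest.length + c.length from by omega]
        have hzip : (natBounds (h :: t)).zip (natBounds (h :: t)).tail
            = (0, 0 + c.length)
              :: ((natBounds rest).zip (natBounds rest).tail).map
                   (Prod.map (· + c.length) (· + c.length)) := by
          rw [hbounds]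
          conv_lhs => rw [hnbr]
          simp only [List.map_cons, List.tail_cons, List.zip_cons_cons]
          congr 1
          rw [show ((0 + c.length) :: List.map (· + c.length) ((natBreaks rest).map (· + 1) ++ [rest.length]))
                = List.map (· + c.length) (0 :: ((natBreaks rest).map (· + 1) ++ [rest.length])) from rfl]
          rw [List.zip_map]
          rw [hnbr]
          simp only [List.tail_cons]
        rw [zonesN, hzip]
        rw [List.filter_cons, List.filter_map]
        have hpred : List.filter
              ((fun p => decide (p.1 + 2 ≤ p.2)) ∘ (Prod.map (· + c.length) (· + c.length)))
              ((natBounds rest).zip (natBounds rest).tail)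
            = List.filter (fun p => decide (p.1 + 2 ≤ p.2))
              ((natBounds rest).zip (natBounds rest).tail) := by
          apply List.filter_congr
          intro p _
          rcases p with ⟨a, b⟩
          simp only [Function.comp, Prod.map, decide_eq_decide]
          omega
        rw [hpred]
        have htail : List.map (fun p => ((h :: t).getD p.1 0, (h :: t).getD (p.2 - 1) 0))
              (List.map (Prod.map (· + c.length) (· + c.length))
                (List.filter (fun p => decide (p.1 + 2 ≤ p.2))
                  ((natBounds rest).zip (natBounds rest).tail)))
            = ref rest := by
          rw [List.map_map]
          rw [← ih rest (by simp at hs; omega), zonesN]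
          apply List.map_congr_left
          intro p hp
          have hpge : p.1 + 2 ≤ p.2 := by
            have := (List.mem_filter.mp hp).2
            simpa using this
          rcases p with ⟨a, b⟩
          simp only [Function.comp, Prod.map]
          have e1 : (c ++ rest).getD (a + c.length) 0 = rest.getD a 0 := by
            rw [List.getD_append_right _ _ _ _ (by omega)]
            congr 1
            omega
          have e2 : (c ++ rest).getD (b + c.length - 1) 0 = rest.getD (b - 1) 0 := by
            rw [List.getD_append_right _ _ _ _ (by omega)]
            congr 1
            omega
          rw [hsplit, e1, e2]
        have hrefct : ref (h :: t) = emitChunk c ++ ref rest := by rw [ref]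
        rw [hrefct]
        by_cases hk2 : 2 ≤ c.length
        · rw [if_pos (by simpa using by omega : decide ((0:Nat) + 2 ≤ 0 + c.length) = true)]
          rw [List.map_cons, htail]
          have e3 : (h :: t).getD 0 0 = c.getD 0 0 := by
            rw [hsplit, List.getD_append _ _ _ _ (by omega)]
          have e4 : (h :: t).getD (0 + c.length - 1) 0 = c.getD (c.length - 1) 0 := by
            rw [hsplit, List.getD_append _ _ _ _ (by omega)]
            congr 1
            omega
          rw [e3, e4]
          simp [emitChunk, hk2]
        · rw [if_neg (by simpa using by omega : ¬ decide ((0:Nat) + 2 ≤ 0 + c.length) = true)]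
          rw [htail]
          simp [emitChunk, hk2]

-- ===== VERDICT (by name: the statement is the Claim_ definition above) =====
theorem group_by_continuity_spec : Claim_equal_group_by_continuity := by
  intro l _
  unfold Spec_group_by_continuity
  rw [A_eq_ref, B_eq_zonesN,
    zonesN_eq_ref (PySem.List.sorted l (fun x => x) false).length _ le_rfl]
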